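-- pv_equiv track=rewrite | github.com/Javitronxo/AdventOfCode | 2016/day_14.py | is_candidate_key
-- ===== SOURCE A (Python) =====
-- from typing import List, Tuple, Union
--
-- def is_candidate_key(hex_hash: str) -> Tuple[bool, Union[None, str]]:
--     """Check if there are 3 consecutive characters in input string"""
--     consecutive = 0
--     for i in range(len(hex_hash) - 1):
--         if hex_hash[i] == hex_hash[i + 1]:
--             consecutive += 1
--             if consecutive == 2:
--                 return True, hex_hash[i]
--         else:
--             consecutive = 0
--     return False, None
-- ===== SOURCE B (Python) =====
-- def _runs(s):
--     """Run-length encode s as [(char, run_length), ...]."""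
--     runs = []
--     i = 0
--     while i < len(s):
--         j = i + 1
--         while j < len(s) and s[j] == s[i]:
--             j += 1
--         runs.append((s[i], j - i))
--         i = j
--     return runs
--
--
-- def is_candidate_key(hex_hash):
--     """Check if there are 3 consecutive characters in input string"""
--     for ch, n in _runs(hex_hash):
--         if n >= 3:
--             return True, ch
--     return False, None
-- ===== Notes on version B (the rewrite author's own statement) =====
-- stated objective: alternative
-- what changed: Replaces the single-pass adjacent-pair counter with two stages: a recursive run-length encoding of the string followed by a scan of the runs for the first run of length >= 3.
import Mathlib
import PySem

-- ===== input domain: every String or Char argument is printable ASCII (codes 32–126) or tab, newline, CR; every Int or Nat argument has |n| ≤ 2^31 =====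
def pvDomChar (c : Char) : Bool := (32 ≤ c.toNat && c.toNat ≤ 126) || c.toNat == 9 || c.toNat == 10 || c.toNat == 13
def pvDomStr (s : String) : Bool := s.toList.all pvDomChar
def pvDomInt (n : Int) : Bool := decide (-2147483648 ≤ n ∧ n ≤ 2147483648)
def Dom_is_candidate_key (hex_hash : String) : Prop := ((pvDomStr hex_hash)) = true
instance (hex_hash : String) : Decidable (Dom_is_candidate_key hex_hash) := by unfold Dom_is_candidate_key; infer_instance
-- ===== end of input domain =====

-- B replaces A's stateful adjacent-pair counter with a staged run-length encoding followed by a scan of the runs; objective: alternative decomposition.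

-- ===== PORT A =====
-- A walks index pairs (s[i], s[i+1]) keeping a `consecutive` counter, returning (True, s[i]) when it reaches 2;
-- transliterated as structural recursion over the character list with the same counter state.
def pvALoop (cs : List Char) (consecutive : Int) : Bool × Option String :=
  match cs with
  | c1 :: c2 :: rest =>
    if c1 == c2 then
      if consecutive + 1 == 2 then (true, some (String.ofList [c1]))
      else pvALoop (c2 :: rest) (consecutive + 1)
    else pvALoop (c2 :: rest) 0
  | _ => (false, none)

def is_candidate_key (hex_hash : String) : Bool × Option String :=
  pvALoop hex_hash.toList 0

-- ===== PORT B =====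
-- `_runs`'s inner while loop `while j < len(s) and s[j] == s[i]` counts how many chars after position i equal
-- s[i]; transliterated as the structural count pvRunLen over the tail (Python's j - i = pvRunLen + 1).
def pvRunLen (c : Char) : List Char → Nat
  | [] => 0
  | x :: xs => if x == c then pvRunLen c xs + 1 else 0

-- port of _runs's outer while loop: emit (s[i], j - i) and continue at i = j, i.e. on the dropped tail
def pvRuns : List Char → List (Char × Nat)
  | [] => []
  | c :: rest =>
    let n := pvRunLen c rest
    (c, n + 1) :: pvRuns (rest.drop n)
termination_by cs => cs.length
decreasing_by simp

-- port of B's for-loop over the runs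
def pvFindRun : List (Char × Nat) → Bool × Option String
  | [] => (false, none)
  | (c, n) :: rs => if n ≥ 3 then (true, some (String.ofList [c])) else pvFindRun rs

def is_candidate_key_alt (hex_hash : String) : Bool × Option String :=
  pvFindRun (pvRuns hex_hash.toList)

-- ===== PRECONDITION & SPEC =====
def Spec_is_candidate_key (hex_hash : String) (out : Bool × Option String) : Prop := out = is_candidate_key_alt hex_hash
instance (hex_hash : String) (out : Bool × Option String) : Decidable (Spec_is_candidate_key hex_hash out) := by unfold Spec_is_candidate_key; infer_instance

-- ===== CLAIM (what is proved, stated in full; the proofs are below) =====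
def Claim_equal_is_candidate_key : Prop := ∀ (hex_hash : String), Dom_is_candidate_key hex_hash → Spec_is_candidate_key hex_hash (is_candidate_key hex_hash)

-- ===== LEMMAS AND PROOFS =====

theorem pvRunLen_le (c : Char) (xs : List Char) : pvRunLen c xs ≤ xs.length := by
  induction xs with
  | nil => simp [pvRunLen]
  | cons x xs ih => by_cases h : (x == c) = true <;> simp [pvRunLen, h] <;> omega

theorem pvRuns_nil : pvRuns [] = [] := by rw [pvRuns.eq_def]

theorem pvRuns_cons (c : Char) (rest : List Char) :
    pvRuns (c :: rest) = (c, pvRunLen c rest + 1) :: pvRuns (rest.drop (pvRunLen c rest)) := by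
  rw [pvRuns.eq_def]

-- A short run (length ≤ 2, i.e. pvRunLen ≤ 1) is skipped by A's loop: it lands after the run with counter 0.
theorem pvALoop_short (c : Char) (rest : List Char) (h : pvRunLen c rest ≤ 1) :
    pvALoop (c :: rest) 0 = pvALoop (rest.drop (pvRunLen c rest)) 0 := by
  cases rest with
  | nil => simp [pvALoop, pvRunLen]
  | cons y ys =>
    by_cases hy : (y == c) = true
    · have hc : y = c := (beq_iff_eq).mp hy
      subst hc
      have h0 : pvRunLen y ys = 0 := by simp [pvRunLen] at h; omega
      simp only [pvRunLen, BEq.rfl, if_true, h0, List.drop_succ_cons, List.drop_zero]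
      cases ys with
      | nil => simp [pvALoop]
      | cons z zs =>
        have hz : (z == y) = false := by
          cases hzz : (z == y) with
          | false => rfl
          | true => simp [pvRunLen, hzz] at h0
        have hz2 : (y == z) = false := by
          simp only [beq_eq_false_iff_ne] at hz ⊢; exact fun e => hz e.symm
        simp [pvALoop, hz2]
    · have hy' : (y == c) = false := by simpa using hy
      have hz : (c == y) = false := by
        simp only [beq_eq_false_iff_ne] at hy' ⊢; exact fun e => hy' e.symm
      simp [pvRunLen, hy', pvALoop, hz]

-- A long run (length ≥ 3) makes A return (True, its character) immediately.
theorem pvALoop_long (c : Char) (rest : List Char) (h : 2 ≤ pvRunLen c rest) :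
    pvALoop (c :: rest) 0 = (true, some (String.ofList [c])) := by
  cases rest with
  | nil => simp [pvRunLen] at h
  | cons y ys =>
    by_cases hy : (y == c) = true
    · have hc : y = c := (beq_iff_eq).mp hy
      subst hc
      cases ys with
      | nil => simp [pvRunLen] at h
      | cons z zs =>
        by_cases hz : (z == y) = true
        · have hc2 : z = y := (beq_iff_eq).mp hz
          subst hc2
          simp [pvALoop]
        · have hz' : (z == y) = false := by simpa using hz
          simp [pvRunLen, hz'] at h
    · have hy' : (y == c) = false := by simpa using hy
      simp [pvRunLen, hy'] at h

theorem pvLoop_eq : ∀ (n : Nat) (cs : List Char), cs.length ≤ n →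
    pvALoop cs 0 = pvFindRun (pvRuns cs) := by
  intro n
  induction n with
  | zero =>
    intro cs h
    cases cs with
    | nil => simp [pvALoop, pvRuns_nil, pvFindRun]
    | cons a t => simp at h
  | succ n ih =>
    intro cs h
    cases cs with
    | nil => simp [pvALoop, pvRuns_nil, pvFindRun]
    | cons c rest =>
      rw [pvRuns_cons]
      by_cases hlong : 2 ≤ pvRunLen c rest
      · rw [pvALoop_long c rest hlong]
        simp only [pvFindRun]
        rw [if_pos (by omega)]
      · have hshort : pvRunLen c rest ≤ 1 := by omega
        rw [pvALoop_short c rest hshort]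
        simp only [pvFindRun]
        rw [if_neg (by omega)]
        apply ih
        have h2 := pvRunLen_le c rest
        simp at h
        simp [List.length_drop]
        omega

-- ===== VERDICT (by name: the statement is the Claim_ definition above) =====
theorem is_candidate_key_spec : Claim_equal_is_candidate_key := by
  intro s _
  unfold Spec_is_candidate_key is_candidate_key is_candidate_key_alt
  exact pvLoop_eq s.toList.length s.toList le_rfl
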